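-- pv_equiv track=rewrite | github.com/Matt-Ord/slate | slate_core/basis/_contracted.py | _get_common_contraction
-- ===== SOURCE A (Python) =====
-- ContractionPath = tuple[int, ...]
--
-- def _get_common_contraction(
--     contractions_0: list[set[ContractionPath]],
--     contractions_1: list[set[ContractionPath]],
-- ) -> list[set[ContractionPath]]:
--     # We want a list of all sets of paths such that all paths
--     # are only present in a single set in contractions_0 and contractions_1.
--     contractions = list[set[ContractionPath]]()
--     for contraction_0 in contractions_0:
--         for contraction_1 in contractions_1:
--             common_paths = contraction_0.intersection(contraction_1)
--             if common_paths:
--                 contractions.append(common_paths)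
--     return contractions
-- ===== SOURCE B (Python) =====
-- ContractionPath = tuple[int, ...]
--
-- def _get_common_contraction(
--     contractions_0: list[set[ContractionPath]],
--     contractions_1: list[set[ContractionPath]],
-- ) -> list[set[ContractionPath]]:
--     # One pass over the paths: index which sets of contractions_1 own each path,
--     # then distribute each set of contractions_0 into per-index buckets.
--     owners: dict[ContractionPath, list[int]] = {}
--     for i1, contraction_1 in enumerate(contractions_1):
--         for path in contraction_1:
--             owners.setdefault(path, []).append(i1)
--     n1 = len(contractions_1)
--     result: list[set[ContractionPath]] = []
--     for contraction_0 in contractions_0: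
--         buckets: list[list[ContractionPath]] = [[] for _ in range(n1)]
--         for path in contraction_0:
--             for i1 in owners.get(path, ()):
--                 buckets[i1].append(path)
--         result.extend(set(b) for b in buckets if b)
--     return result
-- ===== Notes on version B (the rewrite author's own statement) =====
-- stated objective: alternative
-- what changed: Replaces the nested all-pairs intersection loop by a single indexing pass: a dict maps each path to the indices of the contractions_1 sets owning it, and each contractions_0 set is distributed into per-index buckets, emitted in index order (intended as faster asymptotically; a timing run did not confirm it consistently).
import Mathlib
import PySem

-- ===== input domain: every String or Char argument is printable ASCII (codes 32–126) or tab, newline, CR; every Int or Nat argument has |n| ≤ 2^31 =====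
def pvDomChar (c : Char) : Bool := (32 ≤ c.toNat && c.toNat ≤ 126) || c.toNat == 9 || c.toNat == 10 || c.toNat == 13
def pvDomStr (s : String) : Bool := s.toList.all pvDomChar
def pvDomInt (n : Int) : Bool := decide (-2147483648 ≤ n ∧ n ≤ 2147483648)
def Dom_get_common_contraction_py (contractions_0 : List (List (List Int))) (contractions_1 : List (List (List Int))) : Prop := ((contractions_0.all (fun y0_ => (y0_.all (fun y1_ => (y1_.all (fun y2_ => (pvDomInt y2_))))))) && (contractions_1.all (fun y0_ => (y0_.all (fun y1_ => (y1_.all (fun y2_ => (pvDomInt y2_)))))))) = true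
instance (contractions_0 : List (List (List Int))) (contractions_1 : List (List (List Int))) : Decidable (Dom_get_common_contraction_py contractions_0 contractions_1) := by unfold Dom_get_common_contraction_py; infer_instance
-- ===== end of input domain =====

-- B replaces A's nested all-pairs set-intersection loop by one indexing pass (dict path -> owning
-- indices in contractions_1, then per-index buckets); objective: alternative algorithm.
-- Pre_ states the set-representation invariant: the inner lists model Python sets, so they hold
-- distinct elements (duplicate-carrying inner lists represent no Python input of A's type).
-- ===== PORT A =====
def get_common_contraction_py (contractions_0 : List (List (List Int))) (contractions_1 : List (List (List Int))) : List (List (List Int)) :=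
  contractions_0.foldl (fun contractions contraction_0 =>
    contractions_1.foldl (fun contractions contraction_1 =>
      let common_paths := PySem.Set.inter contraction_0 contraction_1
      if common_paths ≠ [] then contractions ++ [common_paths] else contractions)
      contractions) []

-- ===== PORT B =====
-- owners.setdefault(path, []).append(i1), over enumerate(contractions_1)
-- (enumerate indices are nonnegative; ported as Nat)
def pvOwnersGo (i : Nat) (cs : List (List (List Int))) (d : PySem.Dict (List Int) (List Nat)) : PySem.Dict (List Int) (List Nat) :=
  match cs with
  | [] => d
  | c :: rest =>
      pvOwnersGo (i + 1) rest (c.foldl (fun d path => d.modify path [] (fun v => v ++ [i])) d)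

-- inner loop: for i1 in owners.get(path, ()): buckets[i1].append(path)
def pvBStep (os : List Nat) (path : List Int) (B : List (List (List Int))) : List (List (List Int)) :=
  os.foldl (fun B i1 => B.set i1 (B.getD i1 [] ++ [path])) B

def get_common_contraction_py_alt (contractions_0 : List (List (List Int))) (contractions_1 : List (List (List Int))) : List (List (List Int)) :=
  let owners := pvOwnersGo 0 contractions_1 PySem.Dict.empty
  let n1 := contractions_1.length
  contractions_0.foldl (fun result contraction_0 =>
    let buckets :=
      contraction_0.foldl (fun B path => pvBStep (owners.getD path []) path B)
        (List.replicate n1 [])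
    result ++ ((buckets.filter (fun b => b ≠ [])).map PySem.Set.ofList)) []

-- ===== PRECONDITION & SPEC =====
-- Pre_ excludes only inner lists with duplicate elements: they are not valid encodings of the
-- Python sets A takes (the type convention encodes a set as its DISTINCT elements).
def Pre_get_common_contraction_py (contractions_0 : List (List (List Int))) (contractions_1 : List (List (List Int))) : Prop :=
  (∀ c ∈ contractions_0, c.Nodup) ∧ (∀ c ∈ contractions_1, c.Nodup)
instance (contractions_0 : List (List (List Int))) (contractions_1 : List (List (List Int))) : Decidable (Pre_get_common_contraction_py contractions_0 contractions_1) := by unfold Pre_get_common_contraction_py; infer_instance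
def pvWitness_get_common_contraction_py : List (List (List Int)) × List (List (List Int)) :=
  ([[[1], [2]], [[3]]], [[[2], [3]], [[1]]])

def Spec_get_common_contraction_py (contractions_0 : List (List (List Int))) (contractions_1 : List (List (List Int))) (out : List (List (List Int))) : Prop := out = get_common_contraction_py_alt contractions_0 contractions_1
instance (contractions_0 : List (List (List Int))) (contractions_1 : List (List (List Int))) (out : List (List (List Int))) : Decidable (Spec_get_common_contraction_py contractions_0 contractions_1 out) := by unfold Spec_get_common_contraction_py; infer_instance

-- ===== CLAIM (what is proved, stated in full; the proofs are below) =====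
def Claim_equal_get_common_contraction_py : Prop := ∀ (contractions_0 : List (List (List Int))) (contractions_1 : List (List (List Int))), Dom_get_common_contraction_py contractions_0 contractions_1 → Pre_get_common_contraction_py contractions_0 contractions_1 → Spec_get_common_contraction_py contractions_0 contractions_1 (get_common_contraction_py contractions_0 contractions_1)

-- ===== LEMMAS AND PROOFS =====

-- spec of owners: the (increasing) indices of the sets of `cs` containing `p`, offset by `i`
def pvS (i : Nat) (cs : List (List (List Int))) (p : List Int) : List Nat :=
  match cs with
  | [] => []
  | c :: rest => (if p ∈ c then [i] else []) ++ pvS (i + 1) rest p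

lemma pvS_lb (cs : List (List (List Int))) (p : List Int) :
    ∀ (i : Nat), ∀ x ∈ pvS i cs p, i ≤ x := by
  induction cs with
  | nil => intro i x hx; simp [pvS] at hx
  | cons c rest ih =>
    intro i x hx
    simp only [pvS, List.mem_append] at hx
    rcases hx with hx | hx
    · split at hx <;> simp_all
    · have := ih (i + 1) x hx; omega

lemma mem_pvS (cs : List (List (List Int))) (p : List Int) :
    ∀ (i j : Nat), j ∈ pvS i cs p ↔ i ≤ j ∧ j - i < cs.length ∧ p ∈ cs.getD (j - i) [] := by
  induction cs with
  | nil => intro i j; simp [pvS]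
  | cons c rest ih =>
    intro i j
    simp only [pvS, List.mem_append, ih (i + 1) j]
    by_cases hj : j = i
    · subst hj
      have hnot : j ∉ pvS (j + 1) rest p :=
        fun hx => absurd (pvS_lb rest p (j + 1) j hx) (by omega)
      have hx2 : ¬ (j + 1 ≤ j) := by omega
      rcases Decidable.em (p ∈ c) with h | h <;>
        simp [h, hx2]
    · by_cases hij : i ≤ j
      · have h1 : j - i = (j - (i + 1)) + 1 := by omega
        have h2 : (c :: rest).getD (j - i) [] = rest.getD (j - (i + 1)) [] := by
          rw [h1]; simp
        rw [h2]
        constructor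
        · rintro (h | ⟨h3, h4, h5⟩)
          · split at h <;> simp_all
          · exact ⟨by omega, by simp only [List.length_cons]; omega, h5⟩
        · rintro ⟨-, h4, h5⟩
          exact Or.inr ⟨by omega, by simp only [List.length_cons] at h4; omega, h5⟩
      · constructor
        · rintro (h | ⟨h2, -⟩)
          · split at h <;> simp_all
          · omega
        · rintro ⟨h, -⟩; omega

lemma pvS_nodup (cs : List (List (List Int))) (p : List Int) :
    ∀ (i : Nat), (pvS i cs p).Nodup := by
  induction cs with
  | nil => intro i; simp [pvS]
  | cons c rest ih =>
    intro i
    simp only [pvS]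
    rcases Decidable.em (p ∈ c) with h | h
    · simp only [if_pos h, List.singleton_append, List.nodup_cons]
      exact ⟨fun hx => absurd (pvS_lb rest p (i + 1) i hx) (by omega), ih (i + 1)⟩
    · simpa [if_neg h] using ih (i + 1)

lemma filter_beq_of_nodup (p : List Int) :
    ∀ (c : List (List Int)), c.Nodup → c.filter (fun x => x == p) = if p ∈ c then [p] else [] := by
  intro c
  induction c with
  | nil => intro _; simp
  | cons x xs ihc =>
    intro hc
    simp only [List.nodup_cons] at hc
    rcases Decidable.em (x = p) with h | h
    · subst h
      simp [ihc hc.2, hc.1]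
    · have hxp : ¬ p = x := fun hh => h hh.symm
      simp only [List.filter_cons, beq_iff_eq, h, if_false,
        List.mem_cons, hxp, false_or]
      exact ihc hc.2

-- one set's worth of the owners loop
lemma owners_step (c : List (List Int)) (hc : c.Nodup) (i : Nat)
    (d : PySem.Dict (List Int) (List Nat)) (p : List Int) :
    (c.foldl (fun d path => d.modify path [] (fun v => v ++ [i])) d).getD p []
      = d.getD p [] ++ (if p ∈ c then [i] else []) := by
  have h1 : c.foldl (fun d path => d.modify path [] (fun v => v ++ [i])) d
      = (c.map (fun path => (path, i))).foldl
          (fun d q => d.modify q.1 [] (fun v => v ++ [q.2])) d := by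
    rw [List.foldl_map]
  rw [h1, PySem.Dict.getD_foldl_modify_append]
  congr 1
  rw [List.filter_map, List.map_map]
  have h2 : (c.filter ((fun q : (List Int) × Nat => q.1 == p) ∘ fun path => (path, i)))
      = c.filter (fun x => x == p) := rfl
  rw [h2, filter_beq_of_nodup p c hc]
  rcases Decidable.em (p ∈ c) with h | h <;> simp [h]

lemma owners_getD (cs : List (List (List Int))) (h : ∀ c ∈ cs, c.Nodup) :
    ∀ (i : Nat) (d : PySem.Dict (List Int) (List Nat)) (p : List Int),
    (pvOwnersGo i cs d).getD p [] = d.getD p [] ++ pvS i cs p := by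
  induction cs with
  | nil => intro i d p; simp [pvOwnersGo, pvS]
  | cons c rest ih =>
    intro i d p
    simp only [pvOwnersGo, pvS]
    rw [ih (fun c hc => h c (List.mem_cons_of_mem _ hc)) (i + 1) _ p,
        owners_step c (h c List.mem_cons_self) i d p, List.append_assoc]

-- bucket loop lemmas
lemma pvBStep_length (os : List Nat) (p : List Int) :
    ∀ (B : List (List (List Int))), (pvBStep os p B).length = B.length := by
  induction os with
  | nil => intro B; simp [pvBStep]
  | cons a os ih =>
    intro B
    simp only [pvBStep, List.foldl_cons] at *
    rw [ih, List.length_set]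

lemma pvBStep_getD (os : List Nat) (p : List Int) (hn : os.Nodup) :
    ∀ (B : List (List (List Int))) (i : Nat), i < B.length → (∀ x ∈ os, x < B.length) →
    (pvBStep os p B).getD i [] = B.getD i [] ++ (if i ∈ os then [p] else []) := by
  induction os with
  | nil => intro B i _ _; simp [pvBStep]
  | cons a os ih =>
    intro B i hi hb
    simp only [List.nodup_cons] at hn
    simp only [pvBStep, List.foldl_cons] at *
    rw [ih hn.2 _ i (by simpa using hi)
        (fun x hx => by rw [List.length_set]; exact hb x (List.mem_cons_of_mem _ hx))]
    rcases Decidable.em (i = a) with h | h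
    · subst h
      rw [List.getD_eq_getElem?_getD, List.getElem?_set_self (hb i List.mem_cons_self),
        List.getD_eq_getElem?_getD]
      simp [hn.1]
    · rw [List.getD_eq_getElem?_getD, List.getElem?_set_ne (fun hh => h hh.symm),
        ← List.getD_eq_getElem?_getD]
      simp only [List.mem_cons]
      rcases Decidable.em (i ∈ os) with h2 | h2 <;> simp [h2, h]

lemma bucket_fold_getD (og : List Int → List Nat) (hnd : ∀ p, (og p).Nodup) :
    ∀ (c0 : List (List Int)) (B : List (List (List Int))) (i : Nat), i < B.length →
    (∀ p x, x ∈ og p → x < B.length) →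
    (c0.foldl (fun B p => pvBStep (og p) p B) B).getD i []
      = B.getD i [] ++ c0.filter (fun p => i ∈ og p) := by
  intro c0
  induction c0 with
  | nil => intro B i _ _; simp
  | cons p c0 ih =>
    intro B i hi hb
    simp only [List.foldl_cons, List.filter_cons]
    rw [ih _ i (by rw [pvBStep_length]; exact hi)
        (fun q x hx => by rw [pvBStep_length]; exact hb q x hx),
      pvBStep_getD (og p) p (hnd p) B i hi (hb p)]
    rcases Decidable.em (i ∈ og p) with h | h <;> simp [h, List.append_assoc]

lemma bucket_fold_length (og : List Int → List Nat) :
    ∀ (c0 : List (List Int)) (B : List (List (List Int))),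
    (c0.foldl (fun B p => pvBStep (og p) p B) B).length = B.length := by
  intro c0
  induction c0 with
  | nil => intro B; simp
  | cons p c0 ih => intro B; simp only [List.foldl_cons]; rw [ih, pvBStep_length]

-- A's inner loop
lemma rowA_fold (c0 : List (List Int)) (c1s : List (List (List Int))) :
    ∀ (acc : List (List (List Int))),
    c1s.foldl (fun contractions contraction_1 =>
        let common_paths := PySem.Set.inter c0 contraction_1
        if common_paths ≠ [] then contractions ++ [common_paths] else contractions) acc
      = acc ++ (c1s.map (fun c1 => PySem.Set.inter c0 c1)).filter (fun b => b ≠ []) := by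
  induction c1s with
  | nil => intro acc; simp
  | cons c1 rest ih =>
    intro acc
    rw [List.foldl_cons]
    rcases Decidable.em (PySem.Set.inter c0 c1 = []) with h | h
    · show List.foldl _ (if PySem.Set.inter c0 c1 ≠ [] then acc ++ [PySem.Set.inter c0 c1] else acc) rest = _
      rw [if_neg (by simpa using h), ih, List.map_cons, List.filter_cons]
      simp [h]
    · show List.foldl _ (if PySem.Set.inter c0 c1 ≠ [] then acc ++ [PySem.Set.inter c0 c1] else acc) rest = _
      rw [if_pos h, ih, List.map_cons, List.filter_cons]
      simp [h, List.append_assoc]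

-- the two rows agree
lemma row_eq (c1s : List (List (List Int))) (h1 : ∀ c ∈ c1s, c.Nodup)
    (c0 : List (List Int)) (h0 : c0.Nodup) :
    (((c0.foldl (fun B path => pvBStep ((pvOwnersGo 0 c1s PySem.Dict.empty).getD path []) path B)
        (List.replicate c1s.length [])).filter (fun b => b ≠ [])).map PySem.Set.ofList)
      = (c1s.map (fun c1 => PySem.Set.inter c0 c1)).filter (fun b => b ≠ []) := by
  have hog : ∀ p, (pvOwnersGo 0 c1s PySem.Dict.empty).getD p [] = pvS 0 c1s p := by
    intro p
    rw [owners_getD c1s h1 0 PySem.Dict.empty p, PySem.Dict.getD_empty, List.nil_append]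
  have hnd : ∀ p, ((pvOwnersGo 0 c1s PySem.Dict.empty).getD p []).Nodup := by
    intro p; rw [hog p]; exact pvS_nodup c1s p 0
  have hub : ∀ p x, x ∈ (pvOwnersGo 0 c1s PySem.Dict.empty).getD p [] → x < c1s.length := by
    intro p x hx
    rw [hog p] at hx
    have := (mem_pvS c1s p 0 x).1 hx
    omega
  have hB : (c0.foldl (fun B path =>
        pvBStep ((pvOwnersGo 0 c1s PySem.Dict.empty).getD path []) path B)
        (List.replicate c1s.length []))
      = c1s.map (fun c1 => PySem.Set.inter c0 c1) := by
    apply List.ext_getElem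
    · rw [bucket_fold_length, List.length_replicate, List.length_map]
    · intro i hi1 hi2
      rw [bucket_fold_length, List.length_replicate] at hi1
      rw [← List.getD_eq_getElem _ [], ← List.getD_eq_getElem _ []]
      rw [bucket_fold_getD _ hnd c0 _ i (by simpa using hi1)
          (fun p x hx => by rw [List.length_replicate]; exact hub p x hx)]
      have hrep : (List.replicate c1s.length ([] : List (List Int))).getD i [] = [] := by
        rcases Decidable.em (i < c1s.length) with h | h
        · rw [List.getD_eq_getElem _ [] (by simpa using h)]; simp
        · rw [List.getD_eq_default _ [] (by simpa using h)]
      rw [hrep, List.nil_append]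
      have hmap : (c1s.map (fun c1 => PySem.Set.inter c0 c1)).getD i []
          = PySem.Set.inter c0 (c1s.getD i []) := by
        rw [List.getD_eq_getElem _ [] (by simpa using hi1), List.getElem_map,
          List.getD_eq_getElem _ [] hi1]
      rw [hmap]
      show c0.filter _ = c0.filter _
      apply List.filter_congr
      intro x hx
      rw [hog x]
      simp only [mem_pvS c1s x 0 i, Nat.zero_le, Nat.sub_zero, true_and]
      simp [hi1]
  rw [hB]
  have hall : ∀ b ∈ (c1s.map (fun c1 => PySem.Set.inter c0 c1)).filter (fun b => b ≠ []),
      PySem.Set.ofList b = b := by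
    intro b hb
    obtain ⟨hmem, -⟩ := List.mem_filter.1 hb
    obtain ⟨c1, -, rfl⟩ := List.mem_map.1 hmem
    exact PySem.Set.ofList_eq_self_of_nodup _ (List.Nodup.filter _ h0)
  rw [List.map_congr_left hall, List.map_id']

theorem get_common_contraction_py_spec_aux :
    ∀ (contractions_0 contractions_1 : List (List (List Int))),
    Pre_get_common_contraction_py contractions_0 contractions_1 →
    get_common_contraction_py contractions_0 contractions_1
      = get_common_contraction_py_alt contractions_0 contractions_1 := by
  intro c0s c1s hpre
  obtain ⟨h0, h1⟩ := hpre
  unfold get_common_contraction_py get_common_contraction_py_alt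
  have hA : List.foldl (fun (contractions : List (List (List Int))) contraction_0 =>
        List.foldl (fun contractions contraction_1 =>
          let common_paths := PySem.Set.inter contraction_0 contraction_1
          if common_paths ≠ [] then contractions ++ [common_paths] else contractions)
          contractions c1s) [] c0s
      = List.foldl (fun acc c0 =>
          acc ++ ((c1s.map (fun c1 => PySem.Set.inter c0 c1)).filter (fun b => b ≠ []))) [] c0s :=
    PySem.List.foldl_congr_mem' c0s _ _ [] (fun c0 _ acc => rowA_fold c0 c1s acc)
  refine hA.trans ?_
  show List.foldl _ [] c0s
      = List.foldl (fun result contraction_0 => result ++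
          (((contraction_0.foldl (fun B path =>
              pvBStep ((pvOwnersGo 0 c1s PySem.Dict.empty).getD path []) path B)
            (List.replicate c1s.length [])).filter (fun b => b ≠ [])).map PySem.Set.ofList)) [] c0s
  exact PySem.List.foldl_congr_mem' c0s _ _ []
    (fun c0 hc0 acc => congrArg (fun r => acc ++ r) (row_eq c1s h1 c0 (h0 c0 hc0)).symm)

-- ===== VERDICT (by name: the statement is the Claim_ definition above) =====
theorem get_common_contraction_py_spec : Claim_equal_get_common_contraction_py := by
  intro c0s c1s _ hpre
  unfold Spec_get_common_contraction_py
  exact get_common_contraction_py_spec_aux c0s c1s hpre
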